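-- pv_equiv track=rewrite | github.com/HamzaM3/rhombus-graph-problems | RhombWifiProblem.py | getParity
-- ===== SOURCE A (Python) =====
-- def getParity(p, gr):
--   res = 'all'
--   for x in gr:
--     if res == 'all':
--       res = p[x]
--     elif (p[x] != 'all' and res != p[x]):
--       raise Exception('Grouping is both even and odd')
--   return res
-- ===== SOURCE B (Python) =====
-- def getParity(p, gr):
--   nz = [p[x] for x in gr if p[x] != 'all']
--   if any(v != nz[0] for v in nz):
--     raise Exception('Grouping is both even and odd')
--   return nz[0] if nz else 'all'
-- ===== Notes on version B (the rewrite author's own statement) =====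
-- stated objective: simpler
-- what changed: Replaces A's single-pass sentinel accumulator with staged declarative passes: build the list of non-'all' parities by a comprehension, check uniformity against its first element with any(), and return by a conditional expression.
import Mathlib
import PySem

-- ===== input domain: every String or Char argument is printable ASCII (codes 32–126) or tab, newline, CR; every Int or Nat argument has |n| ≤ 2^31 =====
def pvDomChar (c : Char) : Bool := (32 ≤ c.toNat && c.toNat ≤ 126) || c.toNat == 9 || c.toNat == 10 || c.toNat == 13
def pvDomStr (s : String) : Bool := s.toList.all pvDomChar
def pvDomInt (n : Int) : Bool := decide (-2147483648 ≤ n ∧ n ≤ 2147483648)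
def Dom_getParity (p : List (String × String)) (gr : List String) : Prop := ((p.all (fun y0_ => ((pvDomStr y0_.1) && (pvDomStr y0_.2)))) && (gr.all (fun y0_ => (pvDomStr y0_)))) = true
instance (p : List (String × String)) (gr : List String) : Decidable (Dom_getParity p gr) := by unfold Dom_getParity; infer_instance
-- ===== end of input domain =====

-- B replaces A's single-pass sentinel accumulator by staged declarative passes:
-- a comprehension collecting the non-'all' parities, an any() uniformity check,
-- and a conditional-expression return (objective: simpler).
-- Both programs raise (KeyError / the explicit Exception) on the same inputs;
-- exactly those inputs are excluded by Pre_getParity.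

-- ===== PORT A =====
-- res-accumulator loop; none = exception (KeyError or the explicit raise)
def getParityLoopA (p : List (String × String)) : String → List String → Option String
  | res, [] => some res
  | res, x :: rest =>
    match (PySem.Dict.mk p).get? x with
    | none => none
    | some v =>
      if res = "all" then getParityLoopA p v rest
      else if v ≠ "all" ∧ res ≠ v then none
      else getParityLoopA p res rest

def getParity (p : List (String × String)) (gr : List String) : String :=
  (getParityLoopA p "all" gr).getD ""

-- ===== PORT B =====
-- the comprehension [p[x] for x in gr if p[x] != 'all']; none = KeyError
def getParityNz (p : List (String × String)) : List String → Option (List String)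
  | [] => some []
  | x :: rest =>
    match (PySem.Dict.mk p).get? x with
    | none => none
    | some v => (getParityNz p rest).map (fun l => if v ≠ "all" then v :: l else l)

def getParity_alt (p : List (String × String)) (gr : List String) : String :=
  match getParityNz p gr with
  | none => ""  -- KeyError
  | some nz =>
    -- any(v != nz[0] for v in nz): lazy, so nz[0] is only read when nz ≠ []
    if nz.any (fun v => v != nz.headD "") then ""  -- the explicit raise
    else match nz with
      | [] => "all"
      | h :: _ => h

-- ===== PRECONDITION & SPEC =====
-- the non-'all' parity values read from the group, in order
def pvalsOf (p : List (String × String)) (gr : List String) : List String :=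
  (gr.filterMap (fun x => (PySem.Dict.mk p).get? x)).filter (fun v => v != "all")

-- Pre_ = exactly the inputs where A returns: every group member is a key of p
-- (else KeyError) and all non-'all' parities agree (else the explicit raise)
def Pre_getParity (p : List (String × String)) (gr : List String) : Prop :=
  (∀ x ∈ gr, ((PySem.Dict.mk p).get? x).isSome = true) ∧
  (∀ v ∈ pvalsOf p gr, ∀ w ∈ pvalsOf p gr, v = w)

instance (p : List (String × String)) (gr : List String) : Decidable (Pre_getParity p gr) := by
  unfold Pre_getParity; infer_instance

def pvWitness_getParity : (List (String × String)) × List String :=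
  ([("a", "even"), ("b", "all")], ["a", "b", "a"])

def Spec_getParity (p : List (String × String)) (gr : List String) (out : String) : Prop := out = getParity_alt p gr
instance (p : List (String × String)) (gr : List String) (out : String) : Decidable (Spec_getParity p gr out) := by unfold Spec_getParity; infer_instance

-- ===== CLAIM =====
def Claim_equal_getParity : Prop := ∀ (p : List (String × String)) (gr : List String), Dom_getParity p gr → Pre_getParity p gr → Spec_getParity p gr (getParity p gr)

-- ===== LEMMAS AND PROOFS =====

-- unfolding pvalsOf one step
lemma pvals_cons (p : List (String × String)) (x : String) (rest : List String)
    (v : String) (hv : (PySem.Dict.mk p).get? x = some v) :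
    pvalsOf p (x :: rest) =
      (if v ≠ "all" then [v] else []) ++ pvalsOf p rest := by
  simp [pvalsOf, hv]
  split <;> simp_all

-- B's comprehension computes pvalsOf when every key is present
lemma nz_eq_pvals (p : List (String × String)) :
    ∀ (gr : List String),
    (∀ x ∈ gr, ((PySem.Dict.mk p).get? x).isSome = true) →
    getParityNz p gr = some (pvalsOf p gr) := by
  intro gr
  induction gr with
  | nil => intro _; simp [getParityNz, pvalsOf]
  | cons x rest ih =>
    intro hkeys
    obtain ⟨v, hv⟩ := Option.isSome_iff_exists.mp (hkeys x (by simp))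
    have := ih (fun y hy => hkeys y (by simp [hy]))
    rw [pvals_cons p x rest v hv]
    simp only [getParityNz, hv, this, Option.map_some]
    split <;> simp

-- A's loop returns the first non-'all' parity (or the carried res) when consistent
lemma loopA_eq (p : List (String × String)) :
    ∀ (gr : List String) (r : String),
    (∀ x ∈ gr, ((PySem.Dict.mk p).get? x).isSome = true) →
    (∀ v ∈ pvalsOf p gr, ∀ w ∈ pvalsOf p gr, v = w) →
    (r ≠ "all" → ∀ v ∈ pvalsOf p gr, v = r) →
    getParityLoopA p r gr =
      some (if r = "all" then (pvalsOf p gr).headD "all" else r) := by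
  intro gr
  induction gr with
  | nil =>
    intro r _ _ _
    simp [getParityLoopA, pvalsOf]
  | cons x rest ih =>
    intro r hkeys hcons hr
    obtain ⟨v, hv⟩ := Option.isSome_iff_exists.mp (hkeys x (by simp))
    have hkeys' : ∀ y ∈ rest, ((PySem.Dict.mk p).get? y).isSome = true :=
      fun y hy => hkeys y (by simp [hy])
    have hpv := pvals_cons p x rest v hv
    have hsub : ∀ w ∈ pvalsOf p rest, w ∈ pvalsOf p (x :: rest) := by
      intro w hw; rw [hpv]; exact List.mem_append_right _ hw
    have hcons' : ∀ a ∈ pvalsOf p rest, ∀ b ∈ pvalsOf p rest, a = b :=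
      fun a ha b hb => hcons a (hsub a ha) b (hsub b hb)
    by_cases hvall : v = "all"
    · have hpv' : pvalsOf p (x :: rest) = pvalsOf p rest := by
        rw [hpv]; simp [hvall]
      by_cases hra : r = "all"
      · subst hra
        simp only [getParityLoopA, hv, if_pos rfl, hvall]
        rw [ih "all" hkeys' hcons' (fun h => absurd rfl h), hpv']
        simp
      · have hcond : ¬ (v ≠ "all" ∧ r ≠ v) := by simp [hvall]
        simp only [getParityLoopA, hv, if_neg hra, if_neg hcond]
        rw [ih r hkeys' hcons' (fun _ w hw => hr hra w (hsub w hw))]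
        simp [hra]
    · have hvmem : v ∈ pvalsOf p (x :: rest) := by
        rw [hpv]; simp [hvall]
      have hhead : (pvalsOf p (x :: rest)).headD "all" = v := by
        rw [hpv]; simp [hvall]
      by_cases hra : r = "all"
      · subst hra
        simp only [getParityLoopA, hv, if_pos rfl]
        rw [ih v hkeys' hcons'
          (fun _ w hw => hcons w (hsub w hw) v hvmem), hhead]
        simp [hvall]
      · have hvr : v = r := hr hra v hvmem
        have hcond : ¬ (v ≠ "all" ∧ r ≠ v) := by simp [hvr]
        simp only [getParityLoopA, hv, if_neg hra, if_neg hcond]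
        rw [ih r hkeys' hcons' (fun _ w hw => hr hra w (hsub w hw))]
        simp [hra]

-- any(v != nz[0]) is false on a list of pairwise-equal elements
lemma any_ne_head_false (nz : List String)
    (h : ∀ v ∈ nz, ∀ w ∈ nz, v = w) :
    nz.any (fun v => v != nz.headD "") = false := by
  cases nz with
  | nil => rfl
  | cons a t =>
    simp only [List.any_eq_false]
    intro v hv
    simp [h v hv a (by simp)]

-- ===== VERDICT =====
theorem getParity_spec : Claim_equal_getParity := by
  intro p gr _ hpre
  unfold Spec_getParity getParity getParity_alt
  rw [loopA_eq p gr "all" hpre.1 hpre.2 (fun h => absurd rfl h),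
      nz_eq_pvals p gr hpre.1]
  simp only [if_pos rfl, Option.getD_some,
    any_ne_head_false (pvalsOf p gr) hpre.2, Bool.false_eq_true, if_false]
  cases pvalsOf p gr <;> rfl
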